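-- pv_equiv track=rewrite | github.com/jahearn3/adventofcode2024 | day12.py | calculate_sides_and_areas
-- ===== SOURCE A (Python) =====
-- def calculate_sides_and_areas(grid):
--     # Create a dictionary to store perimeters and areas
--     regions = {}
--
--     # Get the dimensions of the grid
--     rows = len(grid)
--     cols = len(grid[0]) if rows > 0 else 0
--
--     # To track visited cells
--     visited = set()
--
--     # Directions for neighboring cells (left, right, up, down)
--     directions = [(-1, 0), (1, 0), (0, -1), (0, 1)]
--
--     def is_valid(r, c):
--         return 0 <= r < rows and 0 <= c < cols
--
--     # Function to calculate perimeter and area for a region using DFS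
--     def calc_region_properties(start_r, start_c):
--         plant_type = grid[start_r][start_c]
--         stack = [(start_r, start_c)]
--         region_sides = 0
--         region_area = 0
--
--         while stack:
--             r, c = stack.pop()
--
--             # If this cell has already been visited, skip it
--             if (r, c) in visited:
--                 continue
--
--             # Mark the cell as visited
--             visited.add((r, c))
--             region_area += 1  # Each cell contributes to the area
--
--             # Check all four directions
--             for dr, dc in directions:
--                 nr, nc = r + dr, c + dc
--
--                 # If the neighbor is valid
--                 if is_valid(nr, nc):
--                     if grid[nr][nc] == plant_type:
--                         # Add connected cell for further exploration
--                         stack.append((nr, nc))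
--                     else:
--                         # Neighbor is a different plant type, count this side
--                         region_sides += 1
--                 else:
--                     # Out of bounds counts as a side
--                     region_sides += 1
--
--             # After checking all directions, we count this cell's own sides
--             region_sides += 4
--
--         # Since we counted each edge twice, we need to adjust the total sides
--         # because each side shared between two cells was counted for each cell.
--         return region_sides // 2, region_area
--
--     # Iterate through each cell in the grid
--     for r in range(rows):
--         for c in range(cols):
--             if (r, c) not in visited:
--                 plant_type = grid[r][c]
--                 # Calculate the perimeter and area for this region
--                 region_sides, region_area = calc_region_properties(r, c)
--
--                 # Initialize the list if not already in the dictionary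
--                 if plant_type not in regions:
--                     regions[plant_type] = []
--
--                 # Append (perimeter, area) to the list for the plant type
--                 regions[plant_type].append((region_sides, region_area))
--
--     return regions
-- ===== SOURCE B (Python) =====
-- def calculate_sides_and_areas(grid):
--     rows = len(grid)
--     cols = len(grid[0]) if rows > 0 else 0
--     regions = {}
--     visited = set()
--
--     def region_cells(sr, sc):
--         # BFS over the region with an index-based queue; returns the region's cells
--         t = grid[sr][sc]
--         queue = [(sr, sc)]
--         i = 0
--         cells = []
--         while i < len(queue):
--             r, c = queue[i]
--             i += 1
--             if (r, c) in visited: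
--                 continue
--             visited.add((r, c))
--             cells.append((r, c))
--             for nr, nc in ((r - 1, c), (r + 1, c), (r, c - 1), (r, c + 1)):
--                 if 0 <= nr < rows and 0 <= nc < cols and grid[nr][nc] == t \
--                         and (nr, nc) not in visited:
--                     queue.append((nr, nc))
--         return cells
--
--     for r in range(rows):
--         for c in range(cols):
--             if (r, c) in visited:
--                 continue
--             t = grid[r][c]
--             cells = region_cells(r, c)
--             area = len(cells)
--             # closed form: each cell starts with 8 "sides"; every in-bounds
--             # same-type neighbour relation cancels one of them; halve at the end
--             adj = 0
--             for cr, cc in cells: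
--                 for nr, nc in ((cr - 1, cc), (cr + 1, cc), (cr, cc - 1), (cr, cc + 1)):
--                     if 0 <= nr < rows and 0 <= nc < cols and grid[nr][nc] == t:
--                         adj += 1
--             regions.setdefault(t, []).append(((8 * area - adj) // 2, area))
--     return regions
-- ===== Notes on version B (the rewrite author's own statement) =====
-- stated objective: alternative
-- what changed: Replaces the stack DFS that accumulates the halved side count during the walk (re-pushing already-visited neighbours) with an index-based BFS queue that only collects the region's cells once, plus a separate closed-form pass computing (8*area - same-type-adjacency-count)//2 over the collected cells.
import Mathlib
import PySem

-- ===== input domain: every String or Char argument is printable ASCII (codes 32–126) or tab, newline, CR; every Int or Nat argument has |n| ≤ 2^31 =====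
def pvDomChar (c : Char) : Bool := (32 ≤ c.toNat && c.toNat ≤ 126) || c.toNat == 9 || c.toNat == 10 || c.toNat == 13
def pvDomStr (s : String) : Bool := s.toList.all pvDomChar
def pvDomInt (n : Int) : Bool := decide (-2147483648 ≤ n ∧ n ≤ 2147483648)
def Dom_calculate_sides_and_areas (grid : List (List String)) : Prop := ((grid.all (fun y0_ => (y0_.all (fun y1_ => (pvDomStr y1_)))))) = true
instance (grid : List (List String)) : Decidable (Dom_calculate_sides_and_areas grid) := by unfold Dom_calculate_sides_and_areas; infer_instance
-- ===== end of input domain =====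

-- B replaces A's stack DFS (which counts sides during the walk and re-pushes visited
-- neighbours) by an index-based BFS queue collecting each region's cells once, plus a
-- separate closed-form pass (8*area - same-type adjacencies) // 2; same return value.

-- ===== PORT A =====
-- shared by both ports: grid cell access grid[r][c] and the bounds test 0<=r<rows and 0<=c<cols
def pvCell (grid : List (List String)) (r c : Int) : String :=
  (PySem.List.pyGet? ((PySem.List.pyGet? grid r).getD []) c).getD ""

def pvValid (rows cols r c : Int) : Bool :=
  decide (0 ≤ r) && decide (r < rows) && decide (0 ≤ c) && decide (c < cols)

def pvDirs : List (Int × Int) := [(-1, 0), (1, 0), (0, -1), (0, 1)]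

-- body of A's 'for dr, dc in directions' loop: push same-type valid neighbours, count sides
def pvDirStep (grid : List (List String)) (rows cols : Int) (t : String) (r c : Int)
    (st : List (Int × Int) × Int) (d : Int × Int) : List (Int × Int) × Int :=
  let nr := r + d.1
  let nc := c + d.2
  if pvValid rows cols nr nc then
    if pvCell grid nr nc == t then (st.1 ++ [(nr, nc)], st.2)
    else (st.1, st.2 + 1)
  else (st.1, st.2 + 1)

-- A's 'while stack' loop (fuel only makes the recursion total; it is never exhausted)
def pvDfs (grid : List (List String)) (rows cols : Int) (t : String) :
    Nat → List (Int × Int) → PySem.Set (Int × Int) → Int → Int →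
    PySem.Set (Int × Int) × Int × Int
  | 0, _, vis, sides, area => (vis, sides, area)
  | Nat.succ fuel, stack, vis, sides, area =>
    match PySem.List.pop? stack (-1) with
    | none => (vis, sides, area)
    | some (x, rest) =>
      if PySem.Set.contains vis x then pvDfs grid rows cols t fuel rest vis sides area
      else
        let vis' := PySem.Set.add vis x
        let st := pvDirs.foldl (pvDirStep grid rows cols t x.1 x.2) (rest, sides)
        pvDfs grid rows cols t fuel st.1 vis' (st.2 + 4) (area + 1)

-- body of A's 'for c in range(cols)' loop
def pvStepA (grid : List (List String)) (rows cols : Int)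
    (st : PySem.Dict String (List (Int × Int)) × PySem.Set (Int × Int)) (rc : Int × Int) :
    PySem.Dict String (List (Int × Int)) × PySem.Set (Int × Int) :=
  if PySem.Set.contains st.2 rc then st
  else
    let t := pvCell grid rc.1 rc.2
    let res := pvDfs grid rows cols t (5 * (rows.toNat * cols.toNat) + 1) [rc] st.2 0 0
    let d1 := if st.1.contains t then st.1 else st.1.insert t []
    (d1.modify t [] (fun l => l ++ [(PySem.Int.floordiv res.2.1 2, res.2.2)]), res.1)

def calculate_sides_and_areas (grid : List (List String)) : List (String × List (Int × Int)) :=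
  let rows : Int := grid.length
  let cols : Int := if rows > 0 then (((PySem.List.pyGet? grid 0).getD []).length : Int) else 0
  ((PySem.List.pyRange 0 rows 1).foldl (fun st r =>
      (PySem.List.pyRange 0 cols 1).foldl (fun st c => pvStepA grid rows cols st (r, c)) st)
    (PySem.Dict.empty, PySem.Set.empty)).1.items

-- ===== PORT B =====
def pvNbrs (r c : Int) : List (Int × Int) := [(r - 1, c), (r + 1, c), (r, c - 1), (r, c + 1)]

-- B's 'while i < len(queue)' loop (fuel only makes the recursion total; never exhausted)
def pvBfs (grid : List (List String)) (rows cols : Int) (t : String) :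
    Nat → List (Int × Int) → Nat → PySem.Set (Int × Int) → List (Int × Int) →
    PySem.Set (Int × Int) × List (Int × Int)
  | 0, _, _, vis, cells => (vis, cells)
  | Nat.succ fuel, queue, i, vis, cells =>
    match PySem.List.pyGet? queue (i : Int) with
    | none => (vis, cells)
    | some x =>
      if PySem.Set.contains vis x then pvBfs grid rows cols t fuel queue (i + 1) vis cells
      else
        let vis' := PySem.Set.add vis x
        let queue' := queue ++ (pvNbrs x.1 x.2).filter (fun y =>
          (pvValid rows cols y.1 y.2 && (pvCell grid y.1 y.2 == t)) && !(PySem.Set.contains vis' y))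
        pvBfs grid rows cols t fuel queue' (i + 1) vis' (cells ++ [x])

-- body of B's 'for c in range(cols)' loop
def pvStepB (grid : List (List String)) (rows cols : Int)
    (st : PySem.Dict String (List (Int × Int)) × PySem.Set (Int × Int)) (rc : Int × Int) :
    PySem.Dict String (List (Int × Int)) × PySem.Set (Int × Int) :=
  if PySem.Set.contains st.2 rc then st
  else
    let t := pvCell grid rc.1 rc.2
    let res := pvBfs grid rows cols t (5 * (rows.toNat * cols.toNat) + 1) [rc] 0 st.2 []
    let cells := res.2
    let area : Int := cells.length
    let adj : Int := cells.foldl (fun a x =>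
      (pvNbrs x.1 x.2).foldl (fun a y =>
        if pvValid rows cols y.1 y.2 && (pvCell grid y.1 y.2 == t) then a + 1 else a) a) 0
    ((st.1.setdefault t []).modify t []
        (fun l => l ++ [(PySem.Int.floordiv (8 * area - adj) 2, area)]), res.1)

def calculate_sides_and_areas_alt (grid : List (List String)) : List (String × List (Int × Int)) :=
  let rows : Int := grid.length
  let cols : Int := if rows > 0 then (((PySem.List.pyGet? grid 0).getD []).length : Int) else 0
  ((PySem.List.pyRange 0 rows 1).foldl (fun st r =>
      (PySem.List.pyRange 0 cols 1).foldl (fun st c => pvStepB grid rows cols st (r, c)) st)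
    (PySem.Dict.empty, PySem.Set.empty)).1.items

-- ===== PRECONDITION & SPEC =====
-- Pre_ excludes exactly the ragged grids whose first row is longer than some later row:
-- there Python A raises IndexError (it reads grid[r][c] for every c < len(grid[0])).
def Pre_calculate_sides_and_areas (grid : List (List String)) : Prop :=
  ∀ row ∈ grid, (grid.headD []).length ≤ row.length
instance (grid : List (List String)) : Decidable (Pre_calculate_sides_and_areas grid) := by
  unfold Pre_calculate_sides_and_areas; infer_instance

def pvWitness_calculate_sides_and_areas : List (List String) :=
  [["A", "B"], ["B", "B"]]

def Spec_calculate_sides_and_areas (grid : List (List String)) (out : List (String × List (Int × Int))) : Prop := out = calculate_sides_and_areas_alt grid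
instance (grid : List (List String)) (out : List (String × List (Int × Int))) : Decidable (Spec_calculate_sides_and_areas grid out) := by unfold Spec_calculate_sides_and_areas; infer_instance

-- ===== CLAIM (what is proved, stated in full; the proofs are below) =====
def Claim_equal_calculate_sides_and_areas : Prop := ∀ (grid : List (List String)), Dom_calculate_sides_and_areas grid → Pre_calculate_sides_and_areas grid → Spec_calculate_sides_and_areas grid (calculate_sides_and_areas grid)

-- ===== LEMMAS AND PROOFS =====

-- the same-type, in-bounds neighbours of a cell: exactly what A pushes on its stack
def pvPush (grid : List (List String)) (rows cols : Int) (t : String) (x : Int × Int) : List (Int × Int) :=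
  (pvNbrs x.1 x.2).filter (fun y => pvValid rows cols y.1 y.2 && (pvCell grid y.1 y.2 == t))

def pvCnt (grid : List (List String)) (rows cols : Int) (t : String) (x : Int × Int) : Nat :=
  (pvPush grid rows cols t x).length

def pvEdge (grid : List (List String)) (rows cols : Int) (t : String) (x y : Int × Int) : Prop :=
  y ∈ pvNbrs x.1 x.2 ∧ pvValid rows cols y.1 y.2 = true ∧ pvCell grid y.1 y.2 = t

-- path from x to z along same-type edges, every node avoiding V
inductive pvRA (grid : List (List String)) (rows cols : Int) (t : String) (V : Int × Int → Prop) :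
    Int × Int → Int × Int → Prop
  | refl (x : Int × Int) : ¬ V x → pvRA grid rows cols t V x x
  | head (x y z : Int × Int) : ¬ V x → pvEdge grid rows cols t x y →
      pvRA grid rows cols t V y z → pvRA grid rows cols t V x z

def pvReach (grid : List (List String)) (rows cols : Int) (t : String)
    (V : Int × Int → Prop) (W : List (Int × Int)) (z : Int × Int) : Prop :=
  ∃ w ∈ W, pvRA grid rows cols t V w z

def pvAllCells (rows cols : Int) : Finset (Int × Int) :=
  ((PySem.List.pyRange 0 rows 1).flatMap (fun r =>
    (PySem.List.pyRange 0 cols 1).map (fun c => (r, c)))).toFinset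

noncomputable def pvRegion (grid : List (List String)) (rows cols : Int) (t : String)
    (V : Int × Int → Prop) (W : List (Int × Int)) : Finset (Int × Int) :=
  @Finset.filter _ (fun z => pvReach grid rows cols t V W z) (Classical.decPred _) (pvAllCells rows cols)

def pvUnv (rows cols : Int) (vis : PySem.Set (Int × Int)) : Nat :=
  ((pvAllCells rows cols).filter (fun z => z ∉ vis)).card

lemma pvValid_iff (rows cols r c : Int) :
    pvValid rows cols r c = true ↔ 0 ≤ r ∧ r < rows ∧ 0 ≤ c ∧ c < cols := by
  simp only [pvValid, Bool.and_eq_true, decide_eq_true_eq]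
  tauto

lemma mem_pvAllCells (rows cols : Int) (z : Int × Int) :
    z ∈ pvAllCells rows cols ↔ pvValid rows cols z.1 z.2 = true := by
  obtain ⟨r, c⟩ := z
  simp [pvAllCells, PySem.List.mem_pyRange_one, pvValid_iff, and_assoc]

lemma pvRA_not_start {grid rows cols t V x z} (h : pvRA grid rows cols t V x z) : ¬ V x := by
  cases h <;> assumption

lemma pvRA_not_end {grid rows cols t V x z} (h : pvRA grid rows cols t V x z) : ¬ V z := by
  induction h with
  | refl _ h => exact h
  | head _ _ _ _ _ _ ih => exact ih

lemma pvRA_mono {grid rows cols t} {V V' : Int × Int → Prop} (hV : ∀ a, V' a → V a)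
    {x z} (h : pvRA grid rows cols t V x z) : pvRA grid rows cols t V' x z := by
  induction h with
  | refl a ha => exact pvRA.refl a (fun hc => ha (hV a hc))
  | head a b c ha e _ ih => exact pvRA.head a b c (fun hc => ha (hV a hc)) e ih

lemma pvRA_congrV {grid rows cols t} {V V' : Int × Int → Prop} (hV : ∀ a, V a ↔ V' a) {x z} :
    pvRA grid rows cols t V x z ↔ pvRA grid rows cols t V' x z :=
  ⟨pvRA_mono (fun a h => (hV a).mpr h), pvRA_mono (fun a h => (hV a).mp h)⟩

lemma pvReach_congrV {grid rows cols t} {V V' : Int × Int → Prop} (hV : ∀ a, V a ↔ V' a) {W z} :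
    pvReach grid rows cols t V W z ↔ pvReach grid rows cols t V' W z := by
  unfold pvReach
  exact exists_congr (fun w => and_congr_right (fun _ => pvRA_congrV hV))

lemma pvReach_congrW {grid rows cols t} {V : Int × Int → Prop} {W W' : List (Int × Int)}
    (hW : ∀ w, ¬ V w → (w ∈ W ↔ w ∈ W')) {z} :
    pvReach grid rows cols t V W z ↔ pvReach grid rows cols t V W' z := by
  constructor <;> rintro ⟨w, hw, hra⟩
  · exact ⟨w, (hW w (pvRA_not_start hra)).mp hw, hra⟩
  · exact ⟨w, (hW w (pvRA_not_start hra)).mpr hw, hra⟩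

lemma mem_pvPush {grid rows cols t x y} :
    y ∈ pvPush grid rows cols t x ↔ pvEdge grid rows cols t x y := by
  simp [pvPush, pvEdge, List.mem_filter, and_comm, and_assoc]

-- the key step: popping an unvisited cell x from the worklist
lemma pvRA_insert {grid rows cols t} {V : Int × Int → Prop} (w : Int × Int) {x z}
    (h : pvRA grid rows cols t V x z) :
    pvRA grid rows cols t (fun a => V a ∨ a = w) x z ∨ z = w ∨
      ∃ y, pvEdge grid rows cols t w y ∧ pvRA grid rows cols t (fun a => V a ∨ a = w) y z := by
  induction h with
  | refl x hx =>
    by_cases hw : x = w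
    · exact Or.inr (Or.inl hw)
    · exact Or.inl (pvRA.refl x (by rintro (h | h); exacts [hx h, hw h]))
  | head x y z hx e hra ih =>
    rcases ih with h1 | h1 | ⟨y', e', h'⟩
    · by_cases hw : x = w
      · subst hw; exact Or.inr (Or.inr ⟨y, e, h1⟩)
      · exact Or.inl (pvRA.head x y z (by rintro (h | h); exacts [hx h, hw h]) e h1)
    · exact Or.inr (Or.inl h1)
    · exact Or.inr (Or.inr ⟨y', e', h'⟩)

lemma pvReach_pop {grid rows cols t} {V : Int × Int → Prop} {x : Int × Int} {rest : List (Int × Int)}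
    (hx : ¬ V x) (z : Int × Int) :
    pvReach grid rows cols t V (x :: rest) z ↔
      z = x ∨ pvReach grid rows cols t (fun a => V a ∨ a = x)
        (pvPush grid rows cols t x ++ rest) z := by
  constructor
  · rintro ⟨w, hw, hra⟩
    rcases pvRA_insert x hra with h1 | h1 | ⟨y, e, h'⟩
    · rcases List.mem_cons.mp hw with rfl | hw'
      · exact absurd (Or.inr rfl) (pvRA_not_start h1)
      · exact Or.inr ⟨w, List.mem_append_right _ hw', h1⟩
    · exact Or.inl h1
    · exact Or.inr ⟨y, List.mem_append_left _ (mem_pvPush.mpr e), h'⟩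
  · rintro (rfl | ⟨w, hw, hra⟩)
    · exact ⟨z, List.mem_cons_self, pvRA.refl z hx⟩
    · have hra' : pvRA grid rows cols t V w z := pvRA_mono (fun a h => Or.inl h) hra
      rcases List.mem_append.mp hw with hp | hr
      · exact ⟨x, List.mem_cons_self, pvRA.head x w z hx (mem_pvPush.mp hp) hra'⟩
      · exact ⟨w, List.mem_cons_of_mem _ hr, hra'⟩

lemma pvRegion_congr {grid rows cols t} {V V' : Int × Int → Prop} {W W' : List (Int × Int)}
    (h : ∀ z, pvReach grid rows cols t V W z ↔ pvReach grid rows cols t V' W' z) :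
    pvRegion grid rows cols t V W = pvRegion grid rows cols t V' W' := by
  apply Finset.ext
  intro z
  unfold pvRegion
  rw [@Finset.mem_filter _ _ (Classical.decPred _), @Finset.mem_filter _ _ (Classical.decPred _), h]

lemma mem_pvRegion {grid rows cols t V W z} :
    z ∈ pvRegion grid rows cols t V W ↔
      pvValid rows cols z.1 z.2 = true ∧ pvReach grid rows cols t V W z := by
  unfold pvRegion
  rw [@Finset.mem_filter _ _ (Classical.decPred _), mem_pvAllCells]

lemma pvRegion_pop {grid rows cols t} {V : Int × Int → Prop} {x : Int × Int} {rest : List (Int × Int)}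
    (hx : ¬ V x) (hv : pvValid rows cols x.1 x.2 = true) :
    pvRegion grid rows cols t V (x :: rest) =
      insert x (pvRegion grid rows cols t (fun a => V a ∨ a = x)
        (pvPush grid rows cols t x ++ rest)) := by
  apply Finset.ext
  intro z
  rw [Finset.mem_insert, mem_pvRegion, mem_pvRegion, pvReach_pop hx]
  by_cases hz : z = x
  · subst hz; simp [hv]
  · simp [hz]

lemma pvRegion_not_mem_self {grid rows cols t} {V : Int × Int → Prop} {x : Int × Int} {W} (hx : V x) :
    x ∉ pvRegion grid rows cols t V W := by
  rw [mem_pvRegion]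
  rintro ⟨-, w, -, hra⟩
  exact pvRA_not_end hra hx

lemma pvUnv_add {rows cols : Int} {vis : PySem.Set (Int × Int)} {x : Int × Int}
    (hv : pvValid rows cols x.1 x.2 = true) (hx : x ∉ vis) :
    pvUnv rows cols (PySem.Set.add vis x) + 1 = pvUnv rows cols vis := by
  unfold pvUnv
  have hmem : x ∈ (pvAllCells rows cols).filter (fun z => z ∉ vis) :=
    Finset.mem_filter.mpr ⟨(mem_pvAllCells rows cols x).mpr hv, hx⟩
  have he : (pvAllCells rows cols).filter (fun z => z ∉ PySem.Set.add vis x) =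
      ((pvAllCells rows cols).filter (fun z => z ∉ vis)).erase x := by
    apply Finset.ext
    intro z
    simp only [Finset.mem_erase, Finset.mem_filter, PySem.Set.mem_add]
    tauto
  rw [he, Finset.card_erase_of_mem hmem]
  have : 0 < ((pvAllCells rows cols).filter (fun z => z ∉ vis)).card :=
    Finset.card_pos.mpr ⟨x, hmem⟩
  omega

lemma pvUnv_le (rows cols : Int) (vis : PySem.Set (Int × Int)) :
    pvUnv rows cols vis ≤ rows.toNat * cols.toNat := by
  calc pvUnv rows cols vis ≤ (pvAllCells rows cols).card := Finset.card_filter_le _ _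
    _ ≤ ((PySem.List.pyRange 0 rows 1).flatMap (fun r =>
          (PySem.List.pyRange 0 cols 1).map (fun c => (r, c)))).length := List.toFinset_card_le _
    _ = rows.toNat * cols.toNat := by
        simp [List.length_flatMap, PySem.List.length_pyRange_one, List.map_const',
          List.sum_replicate, smul_eq_mul]

lemma pvFoldDirs (grid : List (List String)) (rows cols : Int) (t : String) (r c : Int) :
    ∀ (ds : List (Int × Int)) (acc : List (Int × Int) × Int),
      ds.foldl (pvDirStep grid rows cols t r c) acc =
        (acc.1 ++ (ds.map (fun d => (r + d.1, c + d.2))).filter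
            (fun y => pvValid rows cols y.1 y.2 && (pvCell grid y.1 y.2 == t)),
         acc.2 + ((ds.map (fun d => (r + d.1, c + d.2))).countP
            (fun y => !(pvValid rows cols y.1 y.2 && (pvCell grid y.1 y.2 == t))) : Int)) := by
  intro ds
  induction ds with
  | nil => intro acc; simp
  | cons d ds ih =>
    intro acc
    rw [List.foldl_cons, ih]
    by_cases hv : pvValid rows cols (r + d.1) (c + d.2) = true
    · by_cases hs : (pvCell grid (r + d.1) (c + d.2) == t) = true
      · simp [pvDirStep, hv, hs, List.filter_cons, List.countP_cons, List.append_assoc]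
      · simp only [pvDirStep, hv, hs, List.map_cons, List.filter_cons, List.countP_cons,
          Bool.and_eq_true, Bool.not_true, Bool.and_true, Bool.and_false, if_true, if_false,
          Bool.not_eq_true', Bool.false_and, Bool.not_false, eq_self_iff_true, and_true]
        simp [hv, hs, Prod.ext_iff]
        push_cast
        ring
    · simp only [pvDirStep, List.map_cons, List.filter_cons, List.countP_cons]
      simp [hv, Prod.ext_iff]
      push_cast
      ring

lemma pvDirs_map (r c : Int) :
    pvDirs.map (fun d => (r + d.1, c + d.2)) = pvNbrs r c := by
  simp [pvDirs, pvNbrs, Prod.ext_iff]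
  omega

lemma pvRegion_nil {grid rows cols t} {V : Int × Int → Prop} :
    pvRegion grid rows cols t V [] = ∅ := by
  apply Finset.ext
  intro z
  simp [mem_pvRegion, pvReach]

lemma pvCountP_not {α : Type} (l : List α) (p : α → Bool) :
    l.countP (fun y => !(p y)) + l.countP p = l.length := by
  induction l with
  | nil => simp
  | cons a l ih =>
    simp only [List.countP_cons, List.length_cons]
    by_cases h : p a = true <;> simp [h] <;> omega

lemma pvPush_len_le {grid rows cols t x} : (pvPush grid rows cols t x).length ≤ 4 :=
  le_trans (List.length_filter_le _ _) (by simp [pvNbrs])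

-- A's inner while loop computes: visited ∪ region, sides = Σ (8 - cnt), area = |region|
lemma pvDfs_spec (grid : List (List String)) (rows cols : Int) (t : String) :
    ∀ (fuel : Nat) (stack : List (Int × Int)) (vis : PySem.Set (Int × Int)) (sides area : Int),
      vis.Nodup →
      (∀ x ∈ stack, pvValid rows cols x.1 x.2 = true) →
      5 * pvUnv rows cols vis + stack.length ≤ fuel →
      (pvDfs grid rows cols t fuel stack vis sides area).1.Nodup ∧
      (∀ z, z ∈ (pvDfs grid rows cols t fuel stack vis sides area).1 ↔
        z ∈ vis ∨ pvReach grid rows cols t (· ∈ vis) stack z) ∧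
      (pvDfs grid rows cols t fuel stack vis sides area).2.1 =
        sides + ∑ z ∈ pvRegion grid rows cols t (· ∈ vis) stack,
          ((8 : Int) - (pvCnt grid rows cols t z : Int)) ∧
      (pvDfs grid rows cols t fuel stack vis sides area).2.2 =
        area + ((pvRegion grid rows cols t (· ∈ vis) stack).card : Int) := by
  intro fuel
  induction fuel with
  | zero =>
    intro stack vis sides area hN hval hfuel
    have hstack : stack = [] := List.eq_nil_of_length_eq_zero (by omega)
    subst hstack
    simp [pvDfs, hN, pvReach, pvRegion_nil]
  | succ fuel ih =>
    intro stack vis sides area hN hval hfuel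
    rcases List.eq_nil_or_concat stack with rfl | ⟨rest, x, rfl⟩
    · simp [pvDfs, PySem.List.pop?, hN, pvReach, pvRegion_nil]
    · simp only [List.concat_eq_append] at hval hfuel ⊢
      have hxv : pvValid rows cols x.1 x.2 = true :=
        hval x (List.mem_append_right _ List.mem_cons_self)
      rw [show pvDfs grid rows cols t (fuel + 1) (rest ++ [x]) vis sides area =
          (if PySem.Set.contains vis x then pvDfs grid rows cols t fuel rest vis sides area
           else pvDfs grid rows cols t fuel
             (pvDirs.foldl (pvDirStep grid rows cols t x.1 x.2) (rest, sides)).1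
             (PySem.Set.add vis x)
             ((pvDirs.foldl (pvDirStep grid rows cols t x.1 x.2) (rest, sides)).2 + 4)
             (area + 1)) from by
        simp [pvDfs, PySem.List.pop?_last]]
      by_cases hc : PySem.Set.contains vis x = true
      · rw [if_pos hc]
        have hx : x ∈ vis := (PySem.Set.contains_iff vis x).mp hc
        have hW : ∀ w, ¬ (w ∈ vis) → (w ∈ rest ++ [x] ↔ w ∈ rest) := by
          intro w hw
          simp only [List.mem_append, List.mem_singleton]
          constructor
          · rintro (h | rfl)
            · exact h
            · exact absurd hx hw
          · exact Or.inl
        obtain ⟨h1, h2, h3, h4⟩ := ih rest vis sides area hN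
          (fun y hy => hval y (List.mem_append_left _ hy))
          (by simp at hfuel ⊢; omega)
        refine ⟨h1, ?_, ?_, ?_⟩
        · intro z
          rw [h2 z, pvReach_congrW hW]
        · rw [h3, pvRegion_congr (fun z => pvReach_congrW hW)]
        · rw [h4, pvRegion_congr (fun z => pvReach_congrW hW)]
      · rw [if_neg hc]
        have hx : x ∉ vis := fun h => hc ((PySem.Set.contains_iff vis x).mpr h)
        rw [pvFoldDirs, pvDirs_map]
        have hpush : (pvNbrs x.1 x.2).filter
            (fun y => pvValid rows cols y.1 y.2 && (pvCell grid y.1 y.2 == t)) =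
            pvPush grid rows cols t x := rfl
        rw [hpush]
        have hcnt : (pvNbrs x.1 x.2).countP
            (fun y => !(pvValid rows cols y.1 y.2 && (pvCell grid y.1 y.2 == t))) =
            4 - pvCnt grid rows cols t x := by
          have := pvCountP_not (pvNbrs x.1 x.2)
            (fun y => pvValid rows cols y.1 y.2 && (pvCell grid y.1 y.2 == t))
          have hlen : (pvNbrs x.1 x.2).length = 4 := by simp [pvNbrs]
          have hf : pvCnt grid rows cols t x = (pvNbrs x.1 x.2).countP
              (fun y => pvValid rows cols y.1 y.2 && (pvCell grid y.1 y.2 == t)) := by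
            exact Eq.symm List.countP_eq_length_filter
          omega
        rw [hcnt]
        have hcnt4 : pvCnt grid rows cols t x ≤ 4 := pvPush_len_le
        obtain ⟨h1, h2, h3, h4⟩ := ih (rest ++ pvPush grid rows cols t x) (PySem.Set.add vis x)
          (sides + ((4 - pvCnt grid rows cols t x : Nat) : Int) + 4) (area + 1)
          (PySem.Set.nodup_add vis x hN)
          (by
            intro y hy
            rcases List.mem_append.mp hy with h | h
            · exact hval y (List.mem_append_left _ h)
            · exact (mem_pvPush.mp h).2.1)
          (by
            have hU := pvUnv_add (vis := vis) hxv hx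
            have hp : (pvPush grid rows cols t x).length ≤ 4 := pvPush_len_le
            simp only [List.length_append] at hfuel ⊢
            omega)
        -- translate the IH's reach/region at (vis.add x, rest ++ push) to (vis, rest ++ [x])
        have hmemadd : ∀ a, (a ∈ vis ∨ a = x) ↔ a ∈ PySem.Set.add vis x := by
          intro a
          rw [PySem.Set.mem_add]
        have hro : ∀ w, ¬ (w ∈ vis) → (w ∈ rest ++ [x] ↔ w ∈ x :: rest) := by
          intro w _
          simp [List.mem_append, or_comm]
        have hro2 : ∀ w, ¬ (w ∈ vis ∨ w = x) →
            (w ∈ pvPush grid rows cols t x ++ rest ↔ w ∈ rest ++ pvPush grid rows cols t x) := by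
          intro w _
          simp [List.mem_append, or_comm]
        have hreach : ∀ z, pvReach grid rows cols t (· ∈ vis) (rest ++ [x]) z ↔
            (z = x ∨ pvReach grid rows cols t (· ∈ PySem.Set.add vis x)
              (rest ++ pvPush grid rows cols t x) z) := by
          intro z
          rw [pvReach_congrW hro, pvReach_pop hx]
          rw [pvReach_congrW hro2, pvReach_congrV hmemadd]
        have hregion : pvRegion grid rows cols t (· ∈ vis) (rest ++ [x]) =
            insert x (pvRegion grid rows cols t (· ∈ PySem.Set.add vis x)
              (rest ++ pvPush grid rows cols t x)) := by
          rw [pvRegion_congr (fun z => pvReach_congrW hro), pvRegion_pop hx hxv]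
          congr 1
          rw [pvRegion_congr (fun z => Iff.trans (pvReach_congrW hro2) (pvReach_congrV hmemadd))]
        have hnotmem : x ∉ pvRegion grid rows cols t (· ∈ PySem.Set.add vis x)
            (rest ++ pvPush grid rows cols t x) :=
          pvRegion_not_mem_self ((PySem.Set.mem_add vis x x).mpr (Or.inr rfl))
        refine ⟨h1, ?_, ?_, ?_⟩
        · intro z
          rw [h2 z, hreach z, PySem.Set.mem_add]
          tauto
        · rw [h3, hregion, Finset.sum_insert hnotmem]
          push_cast [hcnt4]
          ring
        · rw [h4, hregion, Finset.card_insert_of_notMem hnotmem]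
          push_cast
          ring

-- B's inner while loop computes the same visited set and collects the region's cells
lemma pvBfs_spec (grid : List (List String)) (rows cols : Int) (t : String) :
    ∀ (fuel : Nat) (queue : List (Int × Int)) (i : Nat) (vis : PySem.Set (Int × Int))
      (cells : List (Int × Int)),
      vis.Nodup →
      (∀ x ∈ queue.drop i, pvValid rows cols x.1 x.2 = true) →
      5 * pvUnv rows cols vis + (queue.length - i) ≤ fuel →
      (pvBfs grid rows cols t fuel queue i vis cells).1.Nodup ∧
      (∀ z, z ∈ (pvBfs grid rows cols t fuel queue i vis cells).1 ↔
        z ∈ vis ∨ pvReach grid rows cols t (· ∈ vis) (queue.drop i) z) ∧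
      ∃ L, (pvBfs grid rows cols t fuel queue i vis cells).2 = cells ++ L ∧ L.Nodup ∧
        (∀ z, z ∈ L ↔ z ∈ pvRegion grid rows cols t (· ∈ vis) (queue.drop i)) := by
  intro fuel
  induction fuel with
  | zero =>
    intro queue i vis cells hN hval hfuel
    have hd : queue.drop i = [] := List.drop_eq_nil_of_le (by omega)
    rw [hd]
    exact ⟨hN, by simp [pvBfs, pvReach], [], by simp [pvBfs], List.nodup_nil,
      by simp [pvRegion_nil]⟩
  | succ fuel ih =>
    intro queue i vis cells hN hval hfuel
    rcases hqi : PySem.List.pyGet? queue (i : Int) with - | x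
    · have hlen : queue.length ≤ i := by
        by_contra hlt
        rw [PySem.List.pyGet?_natCast, List.getElem?_eq_getElem (by omega)] at hqi
        simp at hqi
      have hd : queue.drop i = [] := List.drop_eq_nil_of_le hlen
      rw [hd]
      refine ⟨?_, ?_, [], ?_, List.nodup_nil, ?_⟩ <;>
        simp [pvBfs, hqi, hN, pvReach, pvRegion_nil]
    · have hilt : i < queue.length := by
        by_contra hge
        rw [PySem.List.pyGet?_natCast, List.getElem?_eq_none_iff.mpr (by omega)] at hqi
        simp at hqi
      have hxq : x = queue[i] := by
        rw [PySem.List.pyGet?_natCast, List.getElem?_eq_getElem hilt] at hqi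
        exact (Option.some_inj.mp hqi).symm
      have hd : queue.drop i = x :: queue.drop (i + 1) := by
        rw [List.drop_eq_getElem_cons hilt, hxq]
      have hstep : pvBfs grid rows cols t (fuel + 1) queue i vis cells =
          (if PySem.Set.contains vis x then pvBfs grid rows cols t fuel queue (i + 1) vis cells
           else pvBfs grid rows cols t fuel
             (queue ++ (pvNbrs x.1 x.2).filter (fun y =>
               (pvValid rows cols y.1 y.2 && (pvCell grid y.1 y.2 == t)) &&
                 !(PySem.Set.contains (PySem.Set.add vis x) y)))
             (i + 1) (PySem.Set.add vis x) (cells ++ [x])) := by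
        simp [pvBfs, hqi]
      rw [hd, hstep]
      have hvald : ∀ y ∈ queue.drop (i + 1), pvValid rows cols y.1 y.2 = true := by
        intro y hy
        exact hval y (by rw [hd]; exact List.mem_cons_of_mem _ hy)
      by_cases hc : PySem.Set.contains vis x = true
      · rw [if_pos hc]
        have hx : x ∈ vis := (PySem.Set.contains_iff vis x).mp hc
        have hW : ∀ w, ¬ (w ∈ vis) → (w ∈ x :: queue.drop (i + 1) ↔ w ∈ queue.drop (i + 1)) := by
          intro w hw
          simp only [List.mem_cons]
          constructor
          · rintro (rfl | h)
            · exact absurd hx hw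
            · exact h
          · exact Or.inr
        obtain ⟨h1, h2, L, hLeq, hLnd, hLmem⟩ := ih queue (i + 1) vis cells hN hvald (by omega)
        refine ⟨h1, ?_, L, hLeq, hLnd, ?_⟩
        · intro z
          rw [h2 z, pvReach_congrW hW]
        · intro z
          rw [hLmem z, pvRegion_congr (fun z => (pvReach_congrW hW).symm)]
      · rw [if_neg hc]
        have hx : x ∉ vis := fun h => hc ((PySem.Set.contains_iff vis x).mpr h)
        have hxv : pvValid rows cols x.1 x.2 = true :=
          hval x (by rw [hd]; exact List.mem_cons_self)
        set pushB := (pvNbrs x.1 x.2).filter (fun y =>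
          (pvValid rows cols y.1 y.2 && (pvCell grid y.1 y.2 == t)) &&
            !(PySem.Set.contains (PySem.Set.add vis x) y)) with hpushB
        have hdq : (queue ++ pushB).drop (i + 1) = queue.drop (i + 1) ++ pushB :=
          List.drop_append_of_le_length (by omega)
        have hpB : pushB.length ≤ 4 :=
          le_trans (List.length_filter_le _ _) (by simp [pvNbrs])
        obtain ⟨h1, h2, L', hLeq, hLnd, hLmem⟩ := ih (queue ++ pushB) (i + 1)
          (PySem.Set.add vis x) (cells ++ [x]) (PySem.Set.nodup_add vis x hN)
          (by
            rw [hdq]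
            intro y hy
            rcases List.mem_append.mp hy with h | h
            · exact hvald y h
            · have := List.mem_filter.mp h
              exact (Bool.and_eq_true _ _ |>.mp (Bool.and_eq_true _ _ |>.mp this.2).1).1)
          (by
            have hU := pvUnv_add (vis := vis) hxv hx
            simp only [List.length_append]
            omega)
        rw [hdq] at h2 hLmem
        have hmemadd : ∀ a, (a ∈ vis ∨ a = x) ↔ a ∈ PySem.Set.add vis x := by
          intro a
          rw [PySem.Set.mem_add]
        have hWB : ∀ w, ¬ (w ∈ vis ∨ w = x) →
            (w ∈ pvPush grid rows cols t x ++ queue.drop (i + 1) ↔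
              w ∈ queue.drop (i + 1) ++ pushB) := by
          intro w hw
          have hwc : PySem.Set.contains (PySem.Set.add vis x) w = false := by
            rw [← Bool.not_eq_true, PySem.Set.contains_iff, PySem.Set.mem_add]
            exact hw
          simp only [List.mem_append, hpushB, List.mem_filter, mem_pvPush, pvEdge, hwc,
            Bool.not_false, Bool.and_true, Bool.and_eq_true, decide_eq_true_eq, beq_iff_eq]
          tauto
        have hreach : ∀ z, pvReach grid rows cols t (· ∈ vis) (x :: queue.drop (i + 1)) z ↔
            (z = x ∨ pvReach grid rows cols t (· ∈ PySem.Set.add vis x)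
              (queue.drop (i + 1) ++ pushB) z) := by
          intro z
          rw [pvReach_pop hx]
          exact or_congr Iff.rfl (Iff.trans (pvReach_congrW hWB) (pvReach_congrV hmemadd))
        have hregion : pvRegion grid rows cols t (· ∈ vis) (x :: queue.drop (i + 1)) =
            insert x (pvRegion grid rows cols t (· ∈ PySem.Set.add vis x)
              (queue.drop (i + 1) ++ pushB)) := by
          rw [pvRegion_pop hx hxv]
          congr 1
          exact pvRegion_congr (fun z => Iff.trans (pvReach_congrW hWB) (pvReach_congrV hmemadd))
        have hxL' : x ∉ L' := by
          intro hmem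
          exact pvRegion_not_mem_self ((PySem.Set.mem_add vis x x).mpr (Or.inr rfl))
            ((hLmem x).mp hmem)
        refine ⟨h1, ?_, x :: L', ?_, List.nodup_cons.mpr ⟨hxL', hLnd⟩, ?_⟩
        · intro z
          rw [h2 z, PySem.Set.mem_add]
          rw [hreach z]
          tauto
        · rw [hLeq]
          simp
        · intro z
          rw [hregion, Finset.mem_insert, List.mem_cons, hLmem z]

lemma pvCountFold (p : Int × Int → Bool) :
    ∀ (ys : List (Int × Int)) (a : Int),
      ys.foldl (fun a y => if p y then a + 1 else a) a = a + (ys.countP p : Int) := by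
  intro ys
  induction ys with
  | nil => intro a; simp
  | cons y ys ih =>
    intro a
    rw [List.foldl_cons, ih, List.countP_cons]
    by_cases h : p y = true <;> simp [h] <;> push_cast <;> ring

lemma pvAdjFold (grid : List (List String)) (rows cols : Int) (t : String) :
    ∀ (l : List (Int × Int)) (a : Int),
      l.foldl (fun a x => (pvNbrs x.1 x.2).foldl (fun a y =>
        if pvValid rows cols y.1 y.2 && (pvCell grid y.1 y.2 == t) then a + 1 else a) a) a =
      a + (l.map (fun x => (pvCnt grid rows cols t x : Int))).sum := by
  intro l
  induction l with
  | nil => intro a; simp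
  | cons x l ih =>
    intro a
    rw [List.foldl_cons, ih, pvCountFold]
    have : (pvNbrs x.1 x.2).countP
        (fun y => pvValid rows cols y.1 y.2 && (pvCell grid y.1 y.2 == t)) =
        pvCnt grid rows cols t x := List.countP_eq_length_filter.symm ▸ rfl
    rw [this]
    simp
    ring

-- the two loop bodies agree given dicts equal and visited sets equal as sets
lemma pvStep_eq (grid : List (List String)) (rows cols : Int)
    (dA dB : PySem.Dict String (List (Int × Int))) (visA visB : PySem.Set (Int × Int))
    (rc : Int × Int) (hdA : dA = dB) (hNA : visA.Nodup) (hNB : visB.Nodup)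
    (hvis : ∀ z, z ∈ visA ↔ z ∈ visB) (hv : pvValid rows cols rc.1 rc.2 = true) :
    (pvStepA grid rows cols (dA, visA) rc).1 = (pvStepB grid rows cols (dB, visB) rc).1 ∧
    (pvStepA grid rows cols (dA, visA) rc).2.Nodup ∧
    (pvStepB grid rows cols (dB, visB) rc).2.Nodup ∧
    (∀ z, z ∈ (pvStepA grid rows cols (dA, visA) rc).2 ↔
      z ∈ (pvStepB grid rows cols (dB, visB) rc).2) := by
  subst hdA
  have hcb : PySem.Set.contains visA rc = PySem.Set.contains visB rc := by
    cases hA : PySem.Set.contains visA rc with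
    | true =>
      exact ((PySem.Set.contains_iff _ _).mpr
        ((hvis rc).mp ((PySem.Set.contains_iff _ _).mp hA))).symm
    | false =>
      cases hB : PySem.Set.contains visB rc with
      | false => rfl
      | true =>
        have : rc ∈ visA := (hvis rc).mpr ((PySem.Set.contains_iff _ _).mp hB)
        rw [← (PySem.Set.contains_iff _ _).mpr this]
        exact hA.symm
  by_cases hc : PySem.Set.contains visA rc = true
  · simp only [pvStepA, pvStepB, hc, ← hcb, if_pos hc, if_true]
    exact ⟨trivial, hNA, hNB, hvis⟩
  · have hcB : ¬ PySem.Set.contains visB rc = true := by rw [← hcb]; exact hc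
    simp only [pvStepA, pvStepB, if_neg hc, if_neg hcB]
    set t := pvCell grid rc.1 rc.2 with ht
    set F := 5 * (rows.toNat * cols.toNat) + 1 with hF
    obtain ⟨a1, a2, a3, a4⟩ := pvDfs_spec grid rows cols t F [rc] visA 0 0 hNA
      (by intro y hy; rw [List.mem_singleton] at hy; subst hy; exact hv)
      (by have := pvUnv_le rows cols visA; simp only [List.length_singleton, hF]; omega)
    obtain ⟨b1, b2, L, bLeq, bLnd, bLmem⟩ := pvBfs_spec grid rows cols t F [rc] 0 visB []
      hNB
      (by intro y hy; simp only [List.drop_zero, List.mem_singleton] at hy; subst hy; exact hv)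
      (by have := pvUnv_le rows cols visB; simp only [List.length_singleton, hF]; omega)
    simp only [List.drop_zero] at b2 bLmem
    simp only [List.nil_append] at bLeq
    have hRAB : pvRegion grid rows cols t (· ∈ visA) [rc] =
        pvRegion grid rows cols t (· ∈ visB) [rc] :=
      pvRegion_congr (fun z => pvReach_congrV (fun a => hvis a))
    have hLfin : L.toFinset = pvRegion grid rows cols t (· ∈ visB) [rc] := by
      apply Finset.ext
      intro z
      rw [List.mem_toFinset, bLmem z]
    have hLlen : (L.length : Int) =
        ((pvRegion grid rows cols t (· ∈ visB) [rc]).card : Int) := by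
      rw [← hLfin, List.toFinset_card_of_nodup bLnd]
    have hsum : (L.map (fun x => (pvCnt grid rows cols t x : Int))).sum =
        ∑ z ∈ pvRegion grid rows cols t (· ∈ visB) [rc], (pvCnt grid rows cols t z : Int) := by
      rw [← hLfin, List.sum_toFinset _ bLnd]
    refine ⟨?_, a1, b1, ?_⟩
    · show ((if (dA).contains t then dA else dA.insert t []).modify t []
          (fun l => l ++ [(PySem.Int.floordiv ((pvDfs grid rows cols t F [rc] visA 0 0).2.1) 2,
            (pvDfs grid rows cols t F [rc] visA 0 0).2.2)]) ) =
        ((dA.setdefault t []).modify t []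
          (fun l => l ++ [(PySem.Int.floordiv
            (8 * ((pvBfs grid rows cols t F [rc] 0 visB []).2.length : Int) -
              ((pvBfs grid rows cols t F [rc] 0 visB []).2.foldl (fun a x =>
                (pvNbrs x.1 x.2).foldl (fun a y =>
                  if pvValid rows cols y.1 y.2 && (pvCell grid y.1 y.2 == t) then a + 1 else a) a) 0)) 2,
            ((pvBfs grid rows cols t F [rc] 0 visB []).2.length : Int))]))
      have hsd : (if (dA).contains t then dA else dA.insert t []) = dA.setdefault t [] := by
        cases hdc : dA.contains t with
        | true => simp [PySem.Dict.setdefault_of_contains, hdc]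
        | false => simp [PySem.Dict.setdefault_of_not_contains, hdc]
      rw [hsd, bLeq, a3, a4, pvAdjFold, hRAB]
      have harg : (0 : Int) + ∑ z ∈ pvRegion grid rows cols t (· ∈ visB) [rc],
            ((8 : Int) - (pvCnt grid rows cols t z : Int)) =
          8 * (L.length : Int) - (0 + (L.map (fun x => (pvCnt grid rows cols t x : Int))).sum) := by
        rw [hsum, hLlen, Finset.sum_sub_distrib, Finset.sum_const, nsmul_eq_mul]
        ring
      rw [harg, hLlen]
      norm_num
    · intro z
      rw [a2 z, b2 z, pvReach_congrV (fun a => hvis a), hvis z]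

lemma pvFold_eq (grid : List (List String)) (rows cols : Int) :
    ∀ (cl : List (Int × Int)) (dA dB : PySem.Dict String (List (Int × Int)))
      (visA visB : PySem.Set (Int × Int)),
      dA = dB → visA.Nodup → visB.Nodup → (∀ z, z ∈ visA ↔ z ∈ visB) →
      (∀ p ∈ cl, pvValid rows cols p.1 p.2 = true) →
      (cl.foldl (pvStepA grid rows cols) (dA, visA)).1 =
        (cl.foldl (pvStepB grid rows cols) (dB, visB)).1 := by
  intro cl
  induction cl with
  | nil =>
    intro dA dB visA visB hd hNA hNB hvis _
    simpa using hd
  | cons p cl ih =>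
    intro dA dB visA visB hd hNA hNB hvis hval
    rw [List.foldl_cons, List.foldl_cons]
    obtain ⟨h1, h2, h3, h4⟩ := pvStep_eq grid rows cols dA dB visA visB p hd hNA hNB hvis
      (hval p List.mem_cons_self)
    have eA : pvStepA grid rows cols (dA, visA) p =
        ((pvStepA grid rows cols (dA, visA) p).1, (pvStepA grid rows cols (dA, visA) p).2) := rfl
    have eB : pvStepB grid rows cols (dB, visB) p =
        ((pvStepB grid rows cols (dB, visB) p).1, (pvStepB grid rows cols (dB, visB) p).2) := rfl
    rw [eA, eB]
    exact ih _ _ _ _ h1 h2 h3 h4 (fun q hq => hval q (List.mem_cons_of_mem _ hq))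

-- ===== VERDICT (by name: the statement is the Claim_ definition above) =====
theorem calculate_sides_and_areas_spec : Claim_equal_calculate_sides_and_areas := by
  intro grid _ _
  unfold Spec_calculate_sides_and_areas
  show calculate_sides_and_areas grid = calculate_sides_and_areas_alt grid
  unfold calculate_sides_and_areas calculate_sides_and_areas_alt
  dsimp only
  set rows : Int := (grid.length : Int) with hrows
  set cols : Int := if rows > 0 then (((PySem.List.pyGet? grid 0).getD []).length : Int) else 0
    with hcols
  have hflat : ∀ (T : Type) (step : T → Int × Int → T) (init : T),
      (PySem.List.pyRange 0 rows 1).foldl (fun st r =>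
        (PySem.List.pyRange 0 cols 1).foldl (fun st c => step st (r, c)) st) init =
      ((PySem.List.pyRange 0 rows 1).flatMap (fun r =>
        (PySem.List.pyRange 0 cols 1).map (fun c => (r, c)))).foldl step init := by
    intro T step init
    rw [List.foldl_flatMap]
    congr 1
    funext st r
    rw [List.foldl_map]
  rw [hflat, hflat]
  have hval : ∀ p ∈ (PySem.List.pyRange 0 rows 1).flatMap (fun r =>
      (PySem.List.pyRange 0 cols 1).map (fun c => (r, c))),
      pvValid rows cols p.1 p.2 = true := by
    intro p hp
    rw [List.mem_flatMap] at hp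
    obtain ⟨r, hr, hp⟩ := hp
    rw [List.mem_map] at hp
    obtain ⟨c, hc, rfl⟩ := hp
    rw [PySem.List.mem_pyRange_one] at hr hc
    rw [pvValid_iff]
    exact ⟨hr.1, hr.2, hc.1, hc.2⟩
  exact congrArg PySem.Dict.items
    (pvFold_eq grid rows cols _ PySem.Dict.empty PySem.Dict.empty PySem.Set.empty
      PySem.Set.empty rfl List.nodup_nil List.nodup_nil (fun z => Iff.rfl) hval)
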